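-- pv_equiv track=rewrite | github.com/Yehuda-Levy923/Project_Euler | Problem79.py | reconstruct_passcode
-- ===== SOURCE A (Python) =====
-- def reconstruct_passcode(sequences):
--     graph = {}
--     indegree = {}
--
--     for seq in sequences:
--         for ch in seq:
--             if ch not in graph:
--                 graph[ch] = []
--             if ch not in indegree:
--                 indegree[ch] = 0
--
--         for i in range(len(seq) - 1):
--             a, b = seq[i], seq[i + 1]
--             if b not in graph[a]:
--                 graph[a].append(b)
--                 indegree[b] += 1
--
--     queue = [ch for ch in indegree if indegree[ch] == 0]
--     passcode = ""
--
--     while queue: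
--         current = queue.pop(0)
--         passcode += current
--         for nxt in graph[current]:
--             indegree[nxt] -= 1
--             if indegree[nxt] == 0:
--                 queue.append(nxt)
--
--     return passcode
-- ===== SOURCE B (Python) =====
-- def reconstruct_passcode(sequences):
--     # Edge-peeling by recomputation: no adjacency dict and no indegree counters.
--     # Keep one global deduplicated edge list; a node is ready exactly when no
--     # remaining edge targets it, recomputed by scanning the remaining edges.
--     nodes = list(dict.fromkeys(ch for seq in sequences for ch in seq))
--     edges = list(dict.fromkeys(p for seq in sequences for p in zip(seq, seq[1:])))
--
--     def go(edges, ready):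
--         if not ready:
--             return ""
--         h, rest = ready[0], ready[1:]
--         out = [e for e in edges if e[0] == h]
--         keep = [e for e in edges if e[0] != h]
--         targets = {b for _, b in keep}
--         newly = [b for _, b in out if b not in targets]
--         return h + go(keep, rest + newly)
--
--     start = [ch for ch in nodes if all(b != ch for _, b in edges)]
--     return go(edges, start)
-- ===== Notes on version B (the rewrite author's own statement) =====
-- stated objective: alternative
-- what changed: B drops A's adjacency dict and indegree counters entirely: it builds one globally deduplicated edge list, and a recursive peel pops the next ready node and recomputes readiness by scanning the remaining edges (a node is ready when no remaining edge targets it), instead of maintaining and decrementing per-node indegree counts.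
import Mathlib
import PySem

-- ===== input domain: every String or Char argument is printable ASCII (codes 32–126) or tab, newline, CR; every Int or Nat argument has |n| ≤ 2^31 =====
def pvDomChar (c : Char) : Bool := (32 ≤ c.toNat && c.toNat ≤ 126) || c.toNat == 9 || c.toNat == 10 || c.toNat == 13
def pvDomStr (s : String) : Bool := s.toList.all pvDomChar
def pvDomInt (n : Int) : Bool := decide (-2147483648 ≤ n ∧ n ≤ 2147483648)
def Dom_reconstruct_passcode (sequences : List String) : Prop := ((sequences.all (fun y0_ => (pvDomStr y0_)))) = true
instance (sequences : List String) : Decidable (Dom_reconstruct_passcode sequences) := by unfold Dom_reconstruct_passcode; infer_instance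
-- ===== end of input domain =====

-- B replaces A's counter-maintaining Kahn loop by edge peeling with recomputed readiness:
-- one deduplicated global edge list, a recursive peel, and "ready = no remaining edge targets it".

-- ===== PORT A =====
-- for ch in seq: lazily create graph[ch] and indegree[ch]
def pvA_addNode (st : PySem.Dict Char (List Char) × PySem.Dict Char Int) (ch : Char) :
    PySem.Dict Char (List Char) × PySem.Dict Char Int :=
  let g := if st.1.contains ch then st.1 else st.1.insert ch []
  let ind := if st.2.contains ch then st.2 else st.2.insert ch 0
  (g, ind)

-- body of 'for i in range(len(seq) - 1)'
def pvA_addEdge (cs : List Char) (st : PySem.Dict Char (List Char) × PySem.Dict Char Int)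
    (i : Int) : PySem.Dict Char (List Char) × PySem.Dict Char Int :=
  let a := PySem.List.pyGetD cs i ' '
  let b := PySem.List.pyGetD cs (i + 1) ' '
  if (st.1.getD a []).contains b then st
  else (st.1.modify a [] (· ++ [b]), st.2.modify b 0 (· + 1))

def pvA_seq (st : PySem.Dict Char (List Char) × PySem.Dict Char Int) (seq : String) :
    PySem.Dict Char (List Char) × PySem.Dict Char Int :=
  let cs := seq.toList
  let st1 := cs.foldl pvA_addNode st
  (PySem.List.pyRange 0 ((cs.length : Int) - 1) 1).foldl (pvA_addEdge cs) st1

-- while queue: pop(0), append neighbours whose indegree hits 0 (fuel bounds the pops)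
def pvA_loop (fuel : Nat) (graph : PySem.Dict Char (List Char)) (ind : PySem.Dict Char Int)
    (queue : List Char) (acc : List Char) : List Char :=
  match fuel with
  | 0 => acc
  | fuel + 1 =>
    match queue with
    | [] => acc
    | current :: rest =>
      let p := (graph.getD current []).foldl
        (fun (p : PySem.Dict Char Int × List Char) nxt =>
          let ind' := p.1.modify nxt 0 (· - 1)
          if ind'.getD nxt 0 == 0 then (ind', p.2 ++ [nxt]) else (ind', p.2)) (ind, rest)
      pvA_loop fuel graph p.1 p.2 (acc ++ [current])

def reconstruct_passcode (sequences : List String) : String :=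
  let st := sequences.foldl pvA_seq (PySem.Dict.empty, PySem.Dict.empty)
  let queue := st.2.keys.filter (fun ch => st.2.getD ch 0 == 0)
  String.ofList (pvA_loop st.2.size st.1 st.2 queue [])

-- ===== PORT B =====
-- the recursive peel: pop the head of ready, drop its out-edges, recompute readiness
def pvB_go (edges : List (Char × Char)) (ready : List Char) : List Char :=
  match ready with
  | [] => []
  | h :: rest =>
    let out := edges.filter (fun e => e.1 == h)
    let keep := edges.filter (fun e => !(e.1 == h))
    let targets : PySem.Set Char := PySem.Set.ofList (keep.map Prod.snd)
    let newly := (out.map Prod.snd).filter (fun b => !(PySem.Set.contains targets b))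
    h :: pvB_go keep (rest ++ newly)
termination_by edges.length + ready.length
decreasing_by
  simp only [List.unattach_filter, List.unattach_attach, List.length_append, List.length_cons]
  have h1 := (List.length_eq_length_filter_add (l := edges) (f := fun e => e.1 == h)).symm
  have h2 := List.length_filter_le
    (fun b => !(PySem.Set.contains (PySem.Set.ofList ((edges.filter (fun e => !(e.1 == h))).map Prod.snd)) b))
    ((edges.filter (fun e => e.1 == h)).map Prod.snd)
  simp only [List.length_map] at h2
  omega

def reconstruct_passcode_alt (sequences : List String) : String :=
  let nodes := PySem.List.dedup (sequences.flatMap (fun s => s.toList))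
  let edges := PySem.List.dedup (sequences.flatMap (fun s => s.toList.zip s.toList.tail))
  let start := nodes.filter (fun ch => edges.all (fun e => !(e.2 == ch)))
  String.ofList (pvB_go edges start)

-- ===== PRECONDITION & SPEC =====
def Spec_reconstruct_passcode (sequences : List String) (out : String) : Prop := out = reconstruct_passcode_alt sequences
instance (sequences : List String) (out : String) : Decidable (Spec_reconstruct_passcode sequences out) := by unfold Spec_reconstruct_passcode; infer_instance

-- ===== CLAIM (what is proved, stated in full; the proofs are below) =====
def Claim_equal_reconstruct_passcode : Prop := ∀ (sequences : List String), Dom_reconstruct_passcode sequences → Spec_reconstruct_passcode sequences (reconstruct_passcode sequences)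

-- ===== LEMMAS AND PROOFS =====

-- A's edge body, phrased on the pair of endpoint characters
def pvStepA (st : PySem.Dict Char (List Char) × PySem.Dict Char Int) (a b : Char) :
    PySem.Dict Char (List Char) × PySem.Dict Char Int :=
  if (st.1.getD a []).contains b then st
  else (st.1.modify a [] (· ++ [b]), st.2.modify b 0 (· + 1))

-- abstraction relation between A's build state and B's (nodes, edges)
def pvRel (g : PySem.Dict Char (List Char)) (ind : PySem.Dict Char Int)
    (N : List Char) (E : List (Char × Char)) : Prop :=
  g.keys = N ∧ ind.keys = N ∧ N.Nodup ∧ E.Nodup ∧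
  (∀ a, g.getD a [] = (E.filter (fun e => e.1 == a)).map Prod.snd) ∧
  (∀ b, ind.getD b 0 = (((E.map Prod.snd).count b : Nat) : Int)) ∧
  (∀ e ∈ E, e.1 ∈ N ∧ e.2 ∈ N)

lemma pv_range_pairs (cs : List Char) (d : Char) :
    (PySem.List.pyRange 0 ((cs.length : Int) - 1) 1).map
      (fun i => (PySem.List.pyGetD cs i d, PySem.List.pyGetD cs (i + 1) d)) = cs.zip cs.tail := by
  apply List.ext_getElem
  · simp [PySem.List.length_pyRange_one]
  · intro k h1 h2
    have hk : k + 1 < cs.length := by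
      simp [PySem.List.length_pyRange_one] at h1; omega
    simp only [List.getElem_map, PySem.List.getElem_pyRange_one, List.getElem_zip, List.getElem_tail]
    have e2 : ((k : Nat) : Int) + 1 = (((k + 1 : Nat)) : Int) := by push_cast; ring
    rw [show (0 : Int) + (k : Nat) = ((k : Nat) : Int) by ring, e2,
        PySem.List.pyGetD_natCast, PySem.List.pyGetD_natCast]
    simp [List.getD_eq_getElem?_getD, hk, Nat.lt_of_succ_lt hk]

lemma pv_edge_fold_eq (cs : List Char) (st : PySem.Dict Char (List Char) × PySem.Dict Char Int) :
    (PySem.List.pyRange 0 ((cs.length : Int) - 1) 1).foldl (pvA_addEdge cs) st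
      = (cs.zip cs.tail).foldl (fun st p => pvStepA st p.1 p.2) st := by
  rw [← pv_range_pairs cs ' ', List.foldl_map]
  rfl

lemma pvRel_addNode {st : PySem.Dict Char (List Char) × PySem.Dict Char Int}
    {N : List Char} {E : List (Char × Char)} (h : pvRel st.1 st.2 N E) (ch : Char) :
    pvRel (pvA_addNode st ch).1 (pvA_addNode st ch).2 (PySem.Set.add N ch) E := by
  obtain ⟨g, ind⟩ := st
  obtain ⟨hkg, hki, hN, hE, hg, hi, hEN⟩ := h
  have cg : g.contains ch = decide (ch ∈ N) := by
    rw [PySem.Dict.contains_eq_decide_mem_keys, hkg]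
  have ci : ind.contains ch = decide (ch ∈ N) := by
    rw [PySem.Dict.contains_eq_decide_mem_keys, hki]
  by_cases hm : ch ∈ N
  · have hc : PySem.Set.contains N ch = true := by simp [hm]
    simp only [pvA_addNode, PySem.Set.add, hc, cg, ci, hm, decide_true, if_true]
    exact ⟨hkg, hki, hN, hE, hg, hi, hEN⟩
  · have hc : PySem.Set.contains N ch = false := by
      simp [hm]
    have hcg : g.contains ch = false := by rw [cg]; simp [hm]
    have hci : ind.contains ch = false := by rw [ci]; simp [hm]
    simp only [pvA_addNode, PySem.Set.add, hc, hcg, hci, Bool.false_eq_true, if_false]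
    refine ⟨?_, ?_, ?_, hE, ?_, ?_, ?_⟩
    · rw [PySem.Dict.keys_insert_of_not_contains _ _ hcg, hkg]
    · rw [PySem.Dict.keys_insert_of_not_contains _ _ hci, hki]
    · exact hN.append (List.nodup_singleton _) (by simp [hm])
    · intro a
      rw [PySem.Dict.getD_insert]
      split
      · rename_i ha
        subst ha
        have hnil : E.filter (fun e => e.1 == a) = [] := by
          rw [List.filter_eq_nil_iff]
          intro e he
          have := (hEN e he).1
          simp only [beq_iff_eq]
          rintro rfl
          exact hm this
        rw [hnil]
        rfl
      · exact hg a
    · intro b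
      rw [PySem.Dict.getD_insert]
      split
      · rename_i hb
        subst hb
        have hz : (E.map Prod.snd).count b = 0 := by
          rw [List.count_eq_zero]
          intro hmem
          obtain ⟨e, he, hsnd⟩ := List.mem_map.mp hmem
          exact hm (hsnd ▸ (hEN e he).2)
        rw [hz]
        rfl
      · exact hi b
    · intro e he
      exact ⟨List.mem_append_left _ (hEN e he).1, List.mem_append_left _ (hEN e he).2⟩

lemma pvRel_nodes {st : PySem.Dict Char (List Char) × PySem.Dict Char Int}
    {N : List Char} {E : List (Char × Char)} (h : pvRel st.1 st.2 N E) (cs : List Char) :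
    pvRel (cs.foldl pvA_addNode st).1 (cs.foldl pvA_addNode st).2
      (PySem.Set.update N cs) E := by
  induction cs generalizing st N with
  | nil => exact h
  | cons c t ih =>
    have h1 := pvRel_addNode h c
    simpa [PySem.Set.update] using ih h1

lemma pvRel_edge {st : PySem.Dict Char (List Char) × PySem.Dict Char Int}
    {N : List Char} {E : List (Char × Char)} (h : pvRel st.1 st.2 N E) {a b : Char}
    (ha : a ∈ N) (hb : b ∈ N) :
    pvRel (pvStepA st a b).1 (pvStepA st a b).2 N (PySem.Set.add E (a, b)) := by
  obtain ⟨g, ind⟩ := st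
  obtain ⟨hkg, hki, hN, hE, hg, hi, hEN⟩ := h
  have hmemiff : (g.getD a []).contains b = PySem.Set.contains E (a, b) := by
    rw [hg a]
    simp only [PySem.Set.contains_eq_listContains]
    by_cases hmm : (a, b) ∈ E
    · have : b ∈ (E.filter (fun e => e.1 == a)).map Prod.snd :=
        List.mem_map.mpr ⟨(a, b), List.mem_filter.mpr ⟨hmm, by simp⟩, rfl⟩
      simp [this, hmm]
    · have : b ∉ (E.filter (fun e => e.1 == a)).map Prod.snd := by
        intro hmem
        obtain ⟨e, he, hsnd⟩ := List.mem_map.mp hmem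
        obtain ⟨heE, hfst⟩ := List.mem_filter.mp he
        apply hmm
        have : e = (a, b) := by
          obtain ⟨e1, e2⟩ := e
          simp only [beq_iff_eq] at hfst
          simp_all
        exact this ▸ heE
      simp [this, hmm]
  by_cases hmm : (a, b) ∈ E
  · have hc : (g.getD a []).contains b = true := by
      rw [hmemiff]; simp [hmm]
    have hadd : PySem.Set.add E (a, b) = E := by
      simp [PySem.Set.add, hmm]
    rw [hadd]
    simp only [pvStepA, hc, if_true]
    exact ⟨hkg, hki, hN, hE, hg, hi, hEN⟩
  · have hc : (g.getD a []).contains b = false := by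
      rw [hmemiff]; simp [hmm]
    have hadd : PySem.Set.add E (a, b) = E ++ [(a, b)] := by
      simp [PySem.Set.add, hmm]
    rw [hadd]
    simp only [pvStepA, hc, Bool.false_eq_true, if_false]
    refine ⟨?_, ?_, hN, ?_, ?_, ?_, ?_⟩
    · rw [PySem.Dict.keys_modify,
        PySem.Dict.keys_insert_of_contains _ _
          (by rw [PySem.Dict.contains_eq_decide_mem_keys, hkg]; simp [ha]), hkg]
    · rw [PySem.Dict.keys_modify,
        PySem.Dict.keys_insert_of_contains _ _
          (by rw [PySem.Dict.contains_eq_decide_mem_keys, hki]; simp [hb]), hki]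
    · exact hE.append (List.nodup_singleton _) (by simp [hmm])
    · intro x
      rw [PySem.Dict.getD_modify, List.filter_append, List.map_append]
      rcases eq_or_ne x a with rfl | hxa
      · rw [if_pos rfl, hg x]
        simp
      · rw [if_neg hxa, hg x]
        have : [(a, b)].filter (fun e => e.1 == x) = [] := by
          simp [Ne.symm hxa]
        rw [this]
        simp
    · intro x
      rw [PySem.Dict.getD_modify, List.map_append]
      rcases eq_or_ne x b with rfl | hxb
      · rw [if_pos rfl, hi x]
        simp [List.count_append]
      · rw [if_neg hxb, hi x]
        simp [List.count_append, Ne.symm hxb]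
    · intro e he
      rcases List.mem_append.mp he with he | he
      · exact hEN e he
      · rw [List.mem_singleton] at he
        subst he
        exact ⟨ha, hb⟩

lemma pvRel_edges {st : PySem.Dict Char (List Char) × PySem.Dict Char Int}
    {N : List Char} {E : List (Char × Char)} (h : pvRel st.1 st.2 N E) (ps : List (Char × Char))
    (hps : ∀ p ∈ ps, p.1 ∈ N ∧ p.2 ∈ N) :
    pvRel (ps.foldl (fun st p => pvStepA st p.1 p.2) st).1
          (ps.foldl (fun st p => pvStepA st p.1 p.2) st).2
          N (PySem.Set.update E ps) := by
  induction ps generalizing st E with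
  | nil => exact h
  | cons p t ih =>
    have h1 := pvRel_edge h (hps p (by simp)).1 (hps p (by simp)).2
    have h2 := ih h1 (fun q hq => hps q (List.mem_cons_of_mem _ hq))
    simpa [PySem.Set.update, List.foldl_cons] using h2

lemma pvRel_seq {st : PySem.Dict Char (List Char) × PySem.Dict Char Int}
    {N : List Char} {E : List (Char × Char)} (h : pvRel st.1 st.2 N E) (s : String) :
    pvRel (pvA_seq st s).1 (pvA_seq st s).2
      (PySem.Set.update N s.toList) (PySem.Set.update E (s.toList.zip s.toList.tail)) := by
  unfold pvA_seq
  simp only [pv_edge_fold_eq]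
  have h1 := pvRel_nodes h s.toList
  apply pvRel_edges h1
  intro p hp
  obtain ⟨hp1, hp2⟩ := List.of_mem_zip hp
  exact ⟨(PySem.Set.mem_update _ _ _).mpr (Or.inr hp1),
         (PySem.Set.mem_update _ _ _).mpr (Or.inr (List.mem_of_mem_tail hp2))⟩

lemma pv_foldl_update_eq_dedup {α β : Type} [BEq α] [LawfulBEq α] (ls : List β) (f : β → List α) :
    ls.foldl (fun s x => PySem.Set.update s (f x)) [] = PySem.List.dedup (ls.flatMap f) := by
  have hgen : ∀ (ls : List β) (init : List α),
      ls.foldl (fun s x => PySem.Set.update s (f x)) init = (ls.flatMap f).foldl PySem.Set.add init := by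
    intro ls
    induction ls with
    | nil => intro init; rfl
    | cons x t ih =>
      intro init
      rw [List.flatMap_cons, List.foldl_append, List.foldl_cons, ih]
      rfl
  rw [hgen, PySem.List.dedup_eq_ofList, PySem.Set.ofList_eq_foldl]

lemma pvRel_all (sequences : List String) :
    pvRel (sequences.foldl pvA_seq (PySem.Dict.empty, PySem.Dict.empty)).1
          (sequences.foldl pvA_seq (PySem.Dict.empty, PySem.Dict.empty)).2
          (PySem.List.dedup (sequences.flatMap (fun s => s.toList)))
          (PySem.List.dedup (sequences.flatMap (fun s => s.toList.zip s.toList.tail))) := by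
  have hfold : ∀ (ls : List String) (st : PySem.Dict Char (List Char) × PySem.Dict Char Int)
      (N : List Char) (E : List (Char × Char)), pvRel st.1 st.2 N E →
      pvRel (ls.foldl pvA_seq st).1 (ls.foldl pvA_seq st).2
        (ls.foldl (fun N s => PySem.Set.update N s.toList) N)
        (ls.foldl (fun E s => PySem.Set.update E (s.toList.zip s.toList.tail)) E) := by
    intro ls
    induction ls with
    | nil => exact fun st N E h => h
    | cons s t ih =>
      intro st N E h
      exact ih _ _ _ (pvRel_seq h s)
  have h0 : pvRel ((PySem.Dict.empty : PySem.Dict Char (List Char)),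
        (PySem.Dict.empty : PySem.Dict Char Int)).1
      ((PySem.Dict.empty : PySem.Dict Char (List Char)), (PySem.Dict.empty : PySem.Dict Char Int)).2
      ([] : List Char) ([] : List (Char × Char)) := by
    refine ⟨?_, ?_, List.nodup_nil, List.nodup_nil, ?_, ?_, ?_⟩ <;>
      simp [PySem.Dict.keys_empty, PySem.Dict.getD_empty]
  have h1 := hfold sequences ((PySem.Dict.empty : PySem.Dict Char (List Char)),
      (PySem.Dict.empty : PySem.Dict Char Int)) [] [] h0
  rw [pv_foldl_update_eq_dedup, pv_foldl_update_eq_dedup] at h1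
  exact h1

-- A's inner fold over the popped node's successors, characterised against the targets of the kept edges
lemma pv_inner (outs : List Char) (T : List Char) (hnd : outs.Nodup) :
    ∀ (ind : PySem.Dict Char Int) (qa : List Char),
    (∀ b, ind.getD b 0 = ((outs.count b : Nat) : Int) + ((T.count b : Nat) : Int)) →
    (outs.foldl (fun (p : PySem.Dict Char Int × List Char) nxt =>
        let ind' := p.1.modify nxt 0 (· - 1)
        if ind'.getD nxt 0 == 0 then (ind', p.2 ++ [nxt]) else (ind', p.2)) (ind, qa)).2
      = qa ++ outs.filter (fun b => decide (b ∉ T)) ∧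
    (∀ b, (outs.foldl (fun (p : PySem.Dict Char Int × List Char) nxt =>
        let ind' := p.1.modify nxt 0 (· - 1)
        if ind'.getD nxt 0 == 0 then (ind', p.2 ++ [nxt]) else (ind', p.2)) (ind, qa)).1.getD b 0
      = ((T.count b : Nat) : Int)) := by
  induction outs with
  | nil =>
    intro ind qa hyp
    refine ⟨by simp, fun b => by simpa using hyp b⟩
  | cons o t ih =>
    intro ind qa hyp
    obtain ⟨hot, hndt⟩ := List.nodup_cons.mp hnd
    have hto : t.count o = 0 := List.count_eq_zero.mpr hot
    have hindo : (ind.modify o 0 (· - 1)).getD o 0 = ((T.count o : Nat) : Int) := by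
      rw [PySem.Dict.getD_modify_self, hyp o]
      simp [List.count_cons_self, hto]
    have hyp' : ∀ b, (ind.modify o 0 (· - 1)).getD b 0
        = ((t.count b : Nat) : Int) + ((T.count b : Nat) : Int) := by
      intro b
      rw [PySem.Dict.getD_modify]
      rcases eq_or_ne b o with rfl | hbo
      · rw [if_pos rfl, hyp b]
        simp [List.count_cons_self, hto]
      · rw [if_neg hbo, hyp b]
        simp [Ne.symm hbo]
    have hcond : ((ind.modify o 0 (· - 1)).getD o 0 == 0) = decide (o ∉ T) := by
      rw [hindo]
      by_cases hoT : o ∈ T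
      · have : 0 < T.count o := List.count_pos_iff.mpr hoT
        simp [hoT]
        omega
      · have : T.count o = 0 := List.count_eq_zero.mpr hoT
        simp [hoT, this]
    simp only [List.foldl_cons, List.filter_cons]
    rw [hcond]
    by_cases hoT : o ∈ T
    · simp only [hoT, not_true, decide_false, Bool.false_eq_true, if_false]
      exact ih hndt _ qa hyp'
    · simp only [hoT, not_false_iff, decide_true, if_true]
      obtain ⟨ha, hb⟩ := ih hndt (ind.modify o 0 (· - 1)) (qa ++ [o]) hyp'
      exact ⟨by rw [ha, List.append_assoc]; rfl, hb⟩

-- multiset split of target counts along the out/keep partition of the edge list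
lemma pv_count_split (l : List (Char × Char)) (p : Char × Char → Bool) (b : Char) :
    ((l.filter p).map Prod.snd).count b + ((l.filter (fun e => !(p e))).map Prod.snd).count b
      = (l.map Prod.snd).count b := by
  induction l with
  | nil => simp
  | cons e t ih =>
    by_cases he : p e = true
    · simp only [List.filter_cons, he, Bool.not_true, Bool.false_eq_true, if_false, if_true,
        List.map_cons, List.count_cons]
      omega
    · have he' : p e = false := by revert he; cases p e <;> simp
      simp only [List.filter_cons, he', Bool.not_false, Bool.false_eq_true, if_false, if_true,
        List.map_cons, List.count_cons]
      omega

-- the main simulation: A's counter loop against B's recursive peel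
lemma pv_loop_sim (G : PySem.Dict Char (List Char)) (E : List (Char × Char)) (N : List Char)
    (hGE : ∀ a, G.getD a [] = (E.filter (fun e => e.1 == a)).map Prod.snd)
    (hE : E.Nodup) (hEN : ∀ e ∈ E, e.2 ∈ N) :
    ∀ (fuel : Nat) (processed queue : List Char) (ind : PySem.Dict Char Int) (acc : List Char),
    (∀ b, ind.getD b 0 = ((((E.filter (fun e => !(processed.contains e.1))).map Prod.snd).count b : Nat) : Int)) →
    (∀ x ∈ processed ++ queue, ((E.filter (fun e => !(processed.contains e.1))).map Prod.snd).count x = 0) →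
    (processed ++ queue).Nodup →
    (∀ x ∈ processed ++ queue, x ∈ N) →
    N.length ≤ fuel + processed.length →
    pvA_loop fuel G ind queue acc
      = acc ++ pvB_go (E.filter (fun e => !(processed.contains e.1))) queue := by
  intro fuel
  induction fuel with
  | zero =>
    intro processed queue ind acc hind hzero hnd hsub hfuel
    have hlen : (processed ++ queue).length ≤ N.length :=
      (List.subperm_of_subset hnd hsub).length_le
    rw [List.length_append] at hlen
    have hq : queue = [] := List.eq_nil_of_length_eq_zero (by omega)
    subst hq
    simp [pvA_loop, pvB_go]
  | succ f ih =>
    intro processed queue ind acc hind hzero hnd hsub hfuel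
    match queue with
    | [] => simp [pvA_loop, pvB_go]
    | h :: rest =>
      have hdisj := List.nodup_append.mp hnd
      have hhp : h ∉ processed := fun hh => hdisj.2.2 h hh h (by simp) rfl
      have hcp : processed.contains h = false := by simpa using hhp
      -- the edges still alive before this step
      have hRh : (E.filter (fun e => !(processed.contains e.1))).filter (fun e => e.1 == h)
          = E.filter (fun e => e.1 == h) := by
        rw [List.filter_filter]
        apply List.filter_congr
        intro e _
        by_cases he : e.1 = h
        · simp [he, hhp]
        · simp [he]
      have hkeep : E.filter (fun e => !((processed ++ [h]).contains e.1))
          = (E.filter (fun e => !(processed.contains e.1))).filter (fun e => !(e.1 == h)) := by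
        rw [List.filter_filter]
        apply List.filter_congr
        intro e _
        by_cases he : e.1 = h
        · simp [he, hhp]
        · simp [he]
      have hRnd : (E.filter (fun e => !(processed.contains e.1))).Nodup :=
        List.filter_sublist.nodup hE
      have houtnd : (((E.filter (fun e => !(processed.contains e.1))).filter
          (fun e => e.1 == h)).map Prod.snd).Nodup := by
        apply List.Nodup.map_on _ (List.filter_sublist.nodup hRnd)
        intro x hx y hy hxy
        have hx1 : x.1 = h := by simpa using (List.mem_filter.mp hx).2
        have hy1 : y.1 = h := by simpa using (List.mem_filter.mp hy).2
        obtain ⟨x1, x2⟩ := x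
        obtain ⟨y1, y2⟩ := y
        simp_all
      have hGh : G.getD h [] = ((E.filter (fun e => !(processed.contains e.1))).filter
          (fun e => e.1 == h)).map Prod.snd := by
        rw [hGE h, hRh]
      have hindsplit : ∀ b, ind.getD b 0
          = (((((E.filter (fun e => !(processed.contains e.1))).filter (fun e => e.1 == h)).map Prod.snd).count b : Nat) : Int)
            + (((((E.filter (fun e => !(processed.contains e.1))).filter (fun e => !(e.1 == h))).map Prod.snd).count b : Nat) : Int) := by
        intro b
        rw [hind b, ← pv_count_split (E.filter (fun e => !(processed.contains e.1))) (fun e => e.1 == h) b]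
        push_cast
        ring
      obtain ⟨hfold2, hfold1⟩ := pv_inner _ _ houtnd ind rest hindsplit
      -- names for the pieces
      set R := E.filter (fun e => !(processed.contains e.1)) with hRdef
      set outs := ((R.filter (fun e => e.1 == h)).map Prod.snd) with houtsdef
      set keep := R.filter (fun e => !(e.1 == h)) with hkeepdef
      set T := keep.map Prod.snd with hTdef
      set newly := outs.filter (fun b => decide (b ∉ T)) with hnewlydef
      have hnewlyB : outs.filter (fun b => !(PySem.Set.contains (PySem.Set.ofList T) b)) = newly := by
        apply List.filter_congr
        intro b _
        by_cases hbT : b ∈ T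
        · simp [PySem.Set.mem_ofList, hbT]
        · simp [PySem.Set.mem_ofList, hbT]
      -- facts about newly
      have hnewly_sub : ∀ x ∈ newly, x ∈ outs := fun x hx => List.mem_of_mem_filter hx
      have houts_cnt : ∀ x ∈ outs, 0 < (R.map Prod.snd).count x := by
        intro x hx
        obtain ⟨e, he, hsnd⟩ := List.mem_map.mp hx
        have heR : e ∈ R := List.mem_of_mem_filter he
        exact List.count_pos_iff.mpr (List.mem_map.mpr ⟨e, heR, hsnd⟩)
      have hnewly_fresh : ∀ x ∈ newly, x ∉ processed ++ h :: rest := by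
        intro x hx hmem
        have := hzero x hmem
        have := houts_cnt x (hnewly_sub x hx)
        omega
      have hnewly_nd : newly.Nodup := List.filter_sublist.nodup houtnd
      have hkeep_count_le : ∀ x, (T.count x) ≤ ((R.map Prod.snd).count x) := by
        intro x
        exact List.Sublist.count_le x (List.filter_sublist.map Prod.snd)
      -- step both programs
      rw [show pvA_loop (f + 1) G ind (h :: rest) acc
          = pvA_loop f G ((G.getD h []).foldl
              (fun (p : PySem.Dict Char Int × List Char) nxt =>
                let ind' := p.1.modify nxt 0 (· - 1)
                if ind'.getD nxt 0 == 0 then (ind', p.2 ++ [nxt]) else (ind', p.2)) (ind, rest)).1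
              ((G.getD h []).foldl
              (fun (p : PySem.Dict Char Int × List Char) nxt =>
                let ind' := p.1.modify nxt 0 (· - 1)
                if ind'.getD nxt 0 == 0 then (ind', p.2 ++ [nxt]) else (ind', p.2)) (ind, rest)).2
              (acc ++ [h]) from rfl]
      rw [hGh]
      rw [hfold2]
      have hstepB : pvB_go R (h :: rest) = h :: pvB_go keep (rest ++ newly) := by
        rw [pvB_go]
        simp only [← hnewlyB, hRdef, houtsdef, hkeepdef, hTdef]
      rw [hstepB]
      have hih := ih (processed ++ [h]) (rest ++ newly)
        (((R.filter (fun e => e.1 == h)).map Prod.snd).foldl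
              (fun (p : PySem.Dict Char Int × List Char) nxt =>
                let ind' := p.1.modify nxt 0 (· - 1)
                if ind'.getD nxt 0 == 0 then (ind', p.2 ++ [nxt]) else (ind', p.2)) (ind, rest)).1
        (acc ++ [h]) ?_ ?_ ?_ ?_ ?_
      · rw [hih, hkeep]
        simp
      · -- counts after the step
        intro b
        rw [hkeep, hfold1 b]
      · -- all already-seen nodes have no remaining in-edge
        intro x hx
        rw [hkeep, ← hTdef]
        rcases List.mem_append.mp hx with hx1 | hx2
        · rcases List.mem_append.mp hx1 with hxp | hxh
          · have h0 := hzero x (List.mem_append_left _ hxp)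
            have hle := hkeep_count_le x
            omega
          · rw [List.mem_singleton] at hxh
            subst hxh
            have h0 := hzero x (List.mem_append_right _ (by simp))
            have hle := hkeep_count_le x
            omega
        · rcases List.mem_append.mp hx2 with hxr | hxn
          · have h0 := hzero x (List.mem_append_right _ (List.mem_cons_of_mem _ hxr))
            have hle := hkeep_count_le x
            omega
          · have hxT : x ∉ T := by simpa using List.of_mem_filter hxn
            exact List.count_eq_zero.mpr hxT
      · -- nodup of the new processed ++ queue
        have hre : (processed ++ [h]) ++ (rest ++ newly) = (processed ++ h :: rest) ++ newly := by
          simp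
        rw [hre]
        apply List.Nodup.append hnd hnewly_nd
        intro x hx1 hx2
        exact hnewly_fresh x hx2 hx1
      · -- membership in N
        intro x hx
        rcases List.mem_append.mp hx with hx1 | hx2
        · rcases List.mem_append.mp hx1 with hxp | hxh
          · exact hsub x (List.mem_append_left _ hxp)
          · rw [List.mem_singleton] at hxh
            subst hxh
            exact hsub x (List.mem_append_right _ (by simp))
        · rcases List.mem_append.mp hx2 with hxr | hxn
          · exact hsub x (List.mem_append_right _ (List.mem_cons_of_mem _ hxr))
          · obtain ⟨e, he, hsnd⟩ := List.mem_map.mp (hnewly_sub x hxn)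
            have heE : e ∈ E := List.mem_of_mem_filter (List.mem_of_mem_filter he)
            exact hsnd ▸ hEN e heE
      · -- fuel
        simp only [List.length_append, List.length_cons]
        omega

-- ===== VERDICT (by name: the statement is the Claim_ definition above) =====
theorem reconstruct_passcode_spec : Claim_equal_reconstruct_passcode := by
  intro sequences _
  unfold Spec_reconstruct_passcode reconstruct_passcode reconstruct_passcode_alt
  dsimp only []
  obtain ⟨hkg, hki, hN, hE, hg, hi, hEN⟩ := pvRel_all sequences
  set st := sequences.foldl pvA_seq (PySem.Dict.empty, PySem.Dict.empty) with hstdef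
  set N := PySem.List.dedup (sequences.flatMap (fun s => s.toList)) with hNdef
  set E := PySem.List.dedup (sequences.flatMap (fun s => s.toList.zip s.toList.tail)) with hEdef
  have hqueue : st.2.keys.filter (fun ch => st.2.getD ch 0 == 0)
      = N.filter (fun ch => E.all (fun e => !(e.2 == ch))) := by
    rw [hki]
    apply List.filter_congr
    intro ch _
    rw [hi ch]
    by_cases hmem : ch ∈ E.map Prod.snd
    · have hpos : 0 < (E.map Prod.snd).count ch := List.count_pos_iff.mpr hmem
      obtain ⟨e, he, hsnd⟩ := List.mem_map.mp hmem
      have hall : E.all (fun e => !(e.2 == ch)) = false := by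
        rw [List.all_eq_false]
        exact ⟨e, he, by simp [hsnd]⟩
      rw [hall]
      simp only [beq_eq_false_iff_ne, ne_eq]
      omega
    · have hz : (E.map Prod.snd).count ch = 0 := List.count_eq_zero.mpr hmem
      have hall : E.all (fun e => !(e.2 == ch)) = true := by
        rw [List.all_eq_true]
        intro e he
        simp only [Bool.not_eq_eq_eq_not, Bool.not_true, beq_eq_false_iff_ne, ne_eq]
        rintro rfl
        exact hmem (List.mem_map.mpr ⟨e, he, rfl⟩)
      rw [hall, hz]
      simp
  have hsize : st.2.size = N.length := by
    have hs : st.2.size = st.2.keys.length := by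
      simp [PySem.Dict.keys, PySem.Dict.size]
    rw [hs, hki]
  have hE0 : E.filter (fun e => !(([] : List Char).contains e.1)) = E :=
    List.filter_eq_self.mpr (fun e _ => rfl)
  have hmain := pv_loop_sim st.1 E N hg hE (fun e he => (hEN e he).2)
    N.length [] (N.filter (fun ch => E.all (fun e => !(e.2 == ch)))) st.2 []
    (by rw [hE0]; exact hi)
    (by
      intro x hx
      rw [hE0]
      simp only [List.nil_append] at hx
      have hcond := List.of_mem_filter hx
      rw [List.all_eq_true] at hcond
      apply List.count_eq_zero.mpr
      intro hmem
      obtain ⟨e, he, hsnd⟩ := List.mem_map.mp hmem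
      have := hcond e he
      simp [hsnd] at this)
    (by simpa using hN.filter _)
    (by
      intro x hx
      simp only [List.nil_append] at hx
      exact List.mem_of_mem_filter hx)
    (by simp)
  rw [hE0] at hmain
  rw [hqueue, hsize, hmain]
  simp
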